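-- pv_equiv track=rewrite | github.com/ericliu4/Data-Structure-and-Algorithms | 2736-minimum-additions-to-make-valid-string/2736-minimum-additions-to-make-valid-string.py | addMinimum
-- ===== SOURCE A (Python) =====
-- def addMinimum(word: str) -> int:
--     ans = 0
--     lttr = "abc"
--     index = 0
--     for ch in word:
--         while ch != lttr[index]:
--             ans += 1
--             index += 1
--             index %= 3
--         index+=1
--         index %= 3
--     if index == 1:
--         ans += 2
--     elif index == 2:
--         ans += 1
--
--     return ans
-- ===== SOURCE B (Python) =====
-- def addMinimum(word: str) -> int:
--     if not word:
--         return 0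
--     groups = 1
--     for prev, cur in zip(word, word[1:]):
--         if cur <= prev:
--             groups += 1
--     return 3 * groups - len(word)
-- ===== Notes on version B (the rewrite author's own statement) =====
-- stated objective: simpler
-- what changed: B replaces A's character-by-character simulation of the abc cycle (inner while loop counting skipped letters plus a final tail fix-up) with a closed form: count maximal increasing runs in one scan of adjacent pairs and return 3*groups - len(word).
import Mathlib
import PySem

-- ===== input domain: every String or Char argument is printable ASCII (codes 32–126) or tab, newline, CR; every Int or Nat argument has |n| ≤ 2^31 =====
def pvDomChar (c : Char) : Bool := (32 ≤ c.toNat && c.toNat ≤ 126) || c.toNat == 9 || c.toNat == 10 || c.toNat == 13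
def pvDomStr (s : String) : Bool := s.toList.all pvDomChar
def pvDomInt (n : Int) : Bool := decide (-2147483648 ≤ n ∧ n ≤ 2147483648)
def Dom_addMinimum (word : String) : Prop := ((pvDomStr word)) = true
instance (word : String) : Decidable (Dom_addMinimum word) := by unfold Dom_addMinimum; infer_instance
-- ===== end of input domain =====

-- B replaces A's simulation of the abc cycle with a one-pass closed form 3*groups - len(word) (objective: simpler).

-- ===== PORT A =====
-- lttr[index]  (index is always 0..2 when the Python loop terminates, so the default is never used)
def lttrGet (i : Int) : Char := (PySem.Str.pyGet? "abc" i).getD ' '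

-- the inner 'while ch != lttr[index]' loop; fuel 3 makes it total (on words over {a,b,c}
-- the Python loop takes at most 2 iterations; elsewhere Python diverges, excluded by Pre_)
def innerWhile (ch : Char) (ans idx : Int) : Nat → Int × Int
  | 0 => (ans, idx)
  | f + 1 =>
    if ch ≠ lttrGet idx then innerWhile ch (ans + 1) (PySem.Int.mod (idx + 1) 3) f
    else (ans, idx)

def addMinimum (word : String) : Int :=
  let st := word.toList.foldl (fun (s : Int × Int) ch =>
    let s' := innerWhile ch s.1 s.2 3
    (s'.1, PySem.Int.mod (s'.2 + 1) 3)) (0, 0)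
  if st.2 = 1 then st.1 + 2
  else if st.2 = 2 then st.1 + 1
  else st.1

-- ===== PORT B =====
def addMinimum_alt (word : String) : Int :=
  match word.toList with
  | [] => 0
  | c :: rest =>
    let groups : Int :=
      ((c :: rest).zip rest).foldl (fun (g : Int) p => if p.2 ≤ p.1 then g + 1 else g) 1
    3 * groups - ((c :: rest).length : Int)

-- ===== PRECONDITION & SPEC =====
-- Pre_ excludes words containing a character other than 'a','b','c': A's inner while loop never
-- terminates there (Python diverges), so A returns on exactly the words over {a,b,c}.
def Pre_addMinimum (word : String) : Prop :=
  (word.toList.all fun c => c == 'a' || c == 'b' || c == 'c') = true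
instance (word : String) : Decidable (Pre_addMinimum word) := by
  unfold Pre_addMinimum; infer_instance

def pvWitness_addMinimum : String := "ab"

def Spec_addMinimum (word : String) (out : Int) : Prop := out = addMinimum_alt word
instance (word : String) (out : Int) : Decidable (Spec_addMinimum word out) := by
  unfold Spec_addMinimum; infer_instance

-- ===== CLAIM (what is proved, stated in full; the proofs are below) =====
def Claim_equal_addMinimum : Prop :=
  ∀ (word : String), Dom_addMinimum word → Pre_addMinimum word →
    Spec_addMinimum word (addMinimum word)

-- ===== LEMMAS AND PROOFS =====

-- position of a letter in "abc"
def posc (c : Char) : Int := if c = 'a' then 0 else if c = 'b' then 1 else 2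

-- number of non-increasing adjacent steps, seen from previous char c
def gcount : Char → List Char → Int
  | _, [] => 0
  | c, x :: xs => (if x ≤ c then 1 else 0) + gcount x xs

-- one step of A's outer loop, from index (posc c + 1) % 3
theorem step_eq (c x : Char) (hc : c = 'a' ∨ c = 'b' ∨ c = 'c')
    (hx : x = 'a' ∨ x = 'b' ∨ x = 'c') (ans : Int) :
    innerWhile x ans (PySem.Int.mod (posc c + 1) 3) 3 =
      (ans + (if x ≤ c then 2 + posc x - posc c else posc x - posc c - 1), posc x) := by
  rcases hc with rfl | rfl | rfl <;> rcases hx with rfl | rfl | rfl <;>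
    simp [innerWhile, lttrGet, posc, PySem.Int.mod, PySem.Str.pyGet?, PySem.List.pyGet?,
      PySem.List.pyIdx?, Int.fmod] <;> ring

theorem loop_inv (l : List Char) (c : Char) (ans : Int)
    (hc : c = 'a' ∨ c = 'b' ∨ c = 'c') (hl : ∀ x ∈ l, x = 'a' ∨ x = 'b' ∨ x = 'c') :
    l.foldl (fun (s : Int × Int) ch =>
        let s' := innerWhile ch s.1 s.2 3
        (s'.1, PySem.Int.mod (s'.2 + 1) 3)) (ans, PySem.Int.mod (posc c + 1) 3) =
      (ans + 3 * gcount c l + posc (l.getLastD c) - posc c - l.length,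
       PySem.Int.mod (posc (l.getLastD c) + 1) 3) := by
  induction l generalizing c ans with
  | nil => simp [gcount]
  | cons x xs ih =>
    have hx : x = 'a' ∨ x = 'b' ∨ x = 'c' := hl x (by simp)
    have hxs : ∀ y ∈ xs, y = 'a' ∨ y = 'b' ∨ y = 'c' := fun y hy => hl y (by simp [hy])
    simp only [List.foldl_cons, step_eq c x hc hx ans]
    rw [ih x _ hx hxs]
    simp only [List.getLastD_cons, gcount, List.length_cons, Prod.mk.injEq]
    refine ⟨?_, trivial⟩
    push_cast
    split_ifs <;> ring

theorem zip_fold (xs : List Char) (c : Char) (g : Int) :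
    ((c :: xs).zip xs).foldl (fun (g : Int) p => if p.2 ≤ p.1 then g + 1 else g) g =
      g + gcount c xs := by
  induction xs generalizing c g with
  | nil => simp [gcount]
  | cons x xs ih =>
    simp only [List.zip_cons_cons, List.foldl_cons, gcount]
    rw [ih]
    split_ifs <;> ring

-- ===== VERDICT (by name: the statement is the Claim_ definition above) =====
theorem addMinimum_spec : Claim_equal_addMinimum := by
  intro word _ hpre0
  have hpre : ∀ c ∈ word.toList, c = 'a' ∨ c = 'b' ∨ c = 'c' := by
    intro c hc
    have := List.all_eq_true.mp hpre0 c hc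
    simpa [or_assoc] using this
  unfold Spec_addMinimum
  cases hw : word.toList with
  | nil => simp [addMinimum, addMinimum_alt, hw]
  | cons c rest =>
    have hpre' : ∀ x ∈ c :: rest, x = 'a' ∨ x = 'b' ∨ x = 'c' := by
      intro x hx; exact hpre x (hw ▸ hx)
    have hc : c = 'a' ∨ c = 'b' ∨ c = 'c' := hpre' c (by simp)
    have hlast : (c :: rest).getLastD 'c' = 'a' ∨ (c :: rest).getLastD 'c' = 'b' ∨
        (c :: rest).getLastD 'c' = 'c' := by
      have h : List.getLastD (c :: rest) 'c' ∈ 'c' :: (c :: rest) := List.getLastD_mem_cons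
      rcases List.mem_cons.mp h with h | h
      · exact Or.inr (Or.inr h)
      · exact hpre' _ h
    have hcle : (if c ≤ 'c' then (1 : Int) else 0) = 1 := by
      rcases hc with rfl | rfl | rfl <;> decide
    have halt : addMinimum_alt word = 3 * (1 + gcount c rest) - ((rest.length : Int) + 1) := by
      simp only [addMinimum_alt, hw, List.length_cons]
      rw [zip_fold rest c 1]
      push_cast; ring
    have key := loop_inv (c :: rest) 'c' 0 (by simp) hpre'
    have hA : addMinimum word =
        3 * gcount 'c' (c :: rest) + posc ((c :: rest).getLastD 'c') - 2 - ((c :: rest).length : Int)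
          + (2 - posc ((c :: rest).getLastD 'c')) := by
      unfold addMinimum
      rw [hw, show ((0 : Int), (0 : Int)) = ((0 : Int), PySem.Int.mod (posc 'c' + 1) 3) by decide,
        key]
      rcases hlast with h | h | h <;> rw [h] <;>
        simp [posc, PySem.Int.mod, Int.fmod] <;> push_cast <;> ring
    rw [hA, halt]
    simp only [gcount, hcle]
    rw [List.length_cons]
    push_cast; ring
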